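-- pv_equiv track=rewrite | github.com/Wentaa/novel-audit | src/app/agents/arbitration_agent.py | _are_recommendations_conflicting
-- ===== SOURCE A (Python) =====
-- def _are_recommendations_conflicting(rec1: str, rec2: str) -> bool:
--     """Check if recommendations are conflicting"""
--     conflicting_pairs = [
--         ("approve", "reject"),
--         ("compliant", "non_compliant"),
--         ("positive", "harmful"),
--         ("excellent", "unacceptable"),
--         ("low", "critical")
--     ]
--
--     for pair in conflicting_pairs:
--         if rec1 in pair and rec2 in pair and rec1 != rec2:
--             return True
--     return False
-- ===== SOURCE B (Python) =====
-- # Encode each known word as a signed axis code: conflicting pairs get codes k and -k.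
-- # Two recommendations conflict iff their codes are nonzero negations of each other.
-- _CODE = {
--     "approve": 1, "reject": -1,
--     "compliant": 2, "non_compliant": -2,
--     "positive": 3, "harmful": -3,
--     "excellent": 4, "unacceptable": -4,
--     "low": 5, "critical": -5,
-- }
--
-- def _are_recommendations_conflicting(rec1: str, rec2: str) -> bool:
--     c1 = _CODE.get(rec1, 0)
--     return c1 != 0 and c1 == -_CODE.get(rec2, 0)
-- ===== Notes on version B (the rewrite author's own statement) =====
-- stated objective: alternative
-- what changed: Replaced the scan over string pairs with a signed-code encoding: each word maps to a nonzero integer where opposites get negated codes, and conflict is decided arithmetically as c1 != 0 and c1 == -c2.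
import Mathlib
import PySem

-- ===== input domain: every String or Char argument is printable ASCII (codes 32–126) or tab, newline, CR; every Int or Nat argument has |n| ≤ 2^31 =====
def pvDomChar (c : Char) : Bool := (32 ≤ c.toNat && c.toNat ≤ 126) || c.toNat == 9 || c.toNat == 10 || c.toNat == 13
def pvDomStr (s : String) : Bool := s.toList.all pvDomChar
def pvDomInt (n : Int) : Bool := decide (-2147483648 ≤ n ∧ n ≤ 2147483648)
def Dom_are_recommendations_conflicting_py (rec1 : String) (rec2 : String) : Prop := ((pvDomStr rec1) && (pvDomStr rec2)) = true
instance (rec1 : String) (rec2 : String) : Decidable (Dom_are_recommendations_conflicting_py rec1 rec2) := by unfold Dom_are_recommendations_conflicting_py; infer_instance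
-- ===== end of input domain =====

-- B replaces A's scan over string pairs with a signed-code encoding (opposite words get negated codes) decided arithmetically (objective: alternative).


-- ===== PORT A =====
def pvPairsA : List (String × String) :=
  [("approve", "reject"),
   ("compliant", "non_compliant"),
   ("positive", "harmful"),
   ("excellent", "unacceptable"),
   ("low", "critical")]

-- the 'for pair in conflicting_pairs' loop with early return True
def pvLoopA : List (String × String) → String → String → Bool
  | [], _, _ => false
  | p :: rest, r1, r2 =>
    if (r1 == p.1 || r1 == p.2) && (r2 == p.1 || r2 == p.2) && !(r1 == r2) then true
    else pvLoopA rest r1 r2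

def are_recommendations_conflicting_py (rec1 : String) (rec2 : String) : Bool :=
  pvLoopA pvPairsA rec1 rec2

-- ===== PORT B =====
def pvCode : PySem.Dict String Int :=
  PySem.Dict.ofList
    [("approve", 1), ("reject", -1),
     ("compliant", 2), ("non_compliant", -2),
     ("positive", 3), ("harmful", -3),
     ("excellent", 4), ("unacceptable", -4),
     ("low", 5), ("critical", -5)]

def are_recommendations_conflicting_py_alt (rec1 : String) (rec2 : String) : Bool :=
  let c1 := PySem.Dict.getD pvCode rec1 0
  c1 != 0 && c1 == -(PySem.Dict.getD pvCode rec2 0)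

-- ===== PRECONDITION & SPEC =====
def Spec_are_recommendations_conflicting_py (rec1 : String) (rec2 : String) (out : Bool) : Prop := out = are_recommendations_conflicting_py_alt rec1 rec2
instance (rec1 : String) (rec2 : String) (out : Bool) : Decidable (Spec_are_recommendations_conflicting_py rec1 rec2 out) := by unfold Spec_are_recommendations_conflicting_py; infer_instance

-- ===== CLAIM (what is proved, stated in full; the proofs are below) =====
def Claim_equal_are_recommendations_conflicting_py : Prop := ∀ (rec1 : String) (rec2 : String), Dom_are_recommendations_conflicting_py rec1 rec2 → Spec_are_recommendations_conflicting_py rec1 rec2 (are_recommendations_conflicting_py rec1 rec2)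

-- ===== LEMMAS AND PROOFS =====

theorem pvCode_eq : pvCode = PySem.Dict.mk
    [("approve", 1), ("reject", -1),
     ("compliant", 2), ("non_compliant", -2),
     ("positive", 3), ("harmful", -3),
     ("excellent", 4), ("unacceptable", -4),
     ("low", 5), ("critical", -5)] := by decide

def pvCodeFn (r : String) : Int :=
  if r = "approve" then 1 else if r = "reject" then -1
  else if r = "compliant" then 2 else if r = "non_compliant" then -2
  else if r = "positive" then 3 else if r = "harmful" then -3
  else if r = "excellent" then 4 else if r = "unacceptable" then -4
  else if r = "low" then 5 else if r = "critical" then -5 else 0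

theorem pv_lookup (r : String) : PySem.Dict.getD pvCode r 0 = pvCodeFn r := by
  rw [pvCode_eq]
  unfold pvCodeFn
  by_cases h1 : r = "approve" <;>
  by_cases h2 : r = "reject" <;>
  by_cases h3 : r = "compliant" <;>
  by_cases h4 : r = "non_compliant" <;>
  by_cases h5 : r = "positive" <;>
  by_cases h6 : r = "harmful" <;>
  by_cases h7 : r = "excellent" <;>
  by_cases h8 : r = "unacceptable" <;>
  by_cases h9 : r = "low" <;>
  by_cases h10 : r = "critical" <;>
  simp_all [PySem.Dict.getD, PySem.Dict.get?, List.find?, eq_comm] <;> (repeat' split) <;> simp_all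

set_option maxHeartbeats 2000000 in
theorem pv_key (r1 r2 : String) :
    are_recommendations_conflicting_py r1 r2 = are_recommendations_conflicting_py_alt r1 r2 := by
  unfold are_recommendations_conflicting_py are_recommendations_conflicting_py_alt pvPairsA
  rw [pv_lookup, pv_lookup]
  unfold pvCodeFn
  by_cases h1 : r1 = "approve" <;>
  by_cases h2 : r1 = "reject" <;>
  by_cases h3 : r1 = "compliant" <;>
  by_cases h4 : r1 = "non_compliant" <;>
  by_cases h5 : r1 = "positive" <;>
  by_cases h6 : r1 = "harmful" <;>
  by_cases h7 : r1 = "excellent" <;>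
  by_cases h8 : r1 = "unacceptable" <;>
  by_cases h9 : r1 = "low" <;>
  by_cases h10 : r1 = "critical" <;>
  simp_all [pvLoopA] <;> split_ifs <;> simp_all

-- ===== VERDICT (by name: the statement is the Claim_ definition above) =====
theorem are_recommendations_conflicting_py_spec : Claim_equal_are_recommendations_conflicting_py := by
  intro r1 r2 _
  exact pv_key r1 r2
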